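-- pv_equiv track=rewrite | github.com/maggym00/killersudo | killer.py | seq_exists
-- ===== SOURCE A (Python) =====
-- def seq_exists(n,l):
--     j=9
--     maximum=0
--     for i in range(l):
--         maximum+=j
--         j-=1
--     if maximum>n:
--         return True
--     else:
--         return False
-- ===== SOURCE B (Python) =====
-- def seq_exists(n, l):
--     # closed form: sum of l terms 9,8,7,... equals l*(19-l)//2 for l > 0
--     return (l * (19 - l) // 2 > n) if l > 0 else (0 > n)
-- ===== Notes on version B (the rewrite author's own statement) =====
-- stated objective: simpler
-- what changed: Replaced the O(l) accumulation loop over range(l) with the closed-form triangular sum l*(19-l)//2 (exact for every l, including l > 10 where the addend goes negative), guarded by l > 0 for the empty loop.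
import Mathlib
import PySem

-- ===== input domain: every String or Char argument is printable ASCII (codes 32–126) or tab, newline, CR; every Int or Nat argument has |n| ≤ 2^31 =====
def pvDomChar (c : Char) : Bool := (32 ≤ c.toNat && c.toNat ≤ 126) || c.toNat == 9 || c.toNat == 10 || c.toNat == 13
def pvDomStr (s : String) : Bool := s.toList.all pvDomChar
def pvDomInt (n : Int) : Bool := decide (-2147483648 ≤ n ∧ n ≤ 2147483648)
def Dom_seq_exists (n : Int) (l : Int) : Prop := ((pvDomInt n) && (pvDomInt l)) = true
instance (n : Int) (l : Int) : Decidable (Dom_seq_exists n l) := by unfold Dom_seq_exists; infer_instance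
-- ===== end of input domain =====

-- B replaces A's O(l) accumulation loop with the closed-form triangular sum l*(19-l)//2 (simpler, O(1)).


-- ===== PORT A =====
-- loop state is (j, maximum); the loop variable i is unused
def seq_exists (n : Int) (l : Int) : Bool :=
  if ((PySem.List.pyRange 0 l 1).foldl
      (fun (s : Int × Int) (_ : Int) => (s.1 - 1, s.2 + s.1)) (9, 0)).2 > n then true else false

-- ===== PORT B =====
def seq_exists_alt (n : Int) (l : Int) : Bool :=
  if l > 0 then decide (PySem.Int.floordiv (l * (19 - l)) 2 > n) else decide ((0 : Int) > n)

-- ===== PRECONDITION & SPEC =====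
def Spec_seq_exists (n : Int) (l : Int) (out : Bool) : Prop := out = seq_exists_alt n l
instance (n : Int) (l : Int) (out : Bool) : Decidable (Spec_seq_exists n l out) := by unfold Spec_seq_exists; infer_instance

-- ===== CLAIM (what is proved, stated in full; the proofs are below) =====
def Claim_equal_seq_exists : Prop := ∀ (n : Int) (l : Int), Dom_seq_exists n l → Spec_seq_exists n l (seq_exists n l)

-- ===== LEMMAS AND PROOFS =====

-- the loop invariant: after k iterations, j = j₀ - k and 2·maximum = 2·m₀ + k·(2·j₀ - k + 1)
theorem seq_loop_spec (k : Nat) (j m : Int) :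
    ((List.range k).foldl (fun (s : Int × Int) (_ : Nat) => (s.1 - 1, s.2 + s.1)) (j, m)).1 = j - k ∧
    2 * ((List.range k).foldl (fun (s : Int × Int) (_ : Nat) => (s.1 - 1, s.2 + s.1)) (j, m)).2
      = 2 * m + k * (2 * j - k + 1) := by
  induction k with
  | zero => simp
  | succ k ih =>
      rw [List.range_succ]
      simp only [List.foldl_append, List.foldl_cons, List.foldl_nil]
      obtain ⟨h1, h2⟩ := ih
      constructor
      · rw [h1]; push_cast; ring
      · push_cast at h1 h2 ⊢
        rw [mul_add, h2, h1]; ring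

theorem seq_exists_spec : Claim_equal_seq_exists := by
  intro n l _
  unfold Spec_seq_exists seq_exists seq_exists_alt
  rw [PySem.List.pyRange_one, List.foldl_map]
  simp only [Int.sub_zero]
  have := seq_loop_spec ((l - 0).toNat) 9 0
  simp only [Int.sub_zero] at this
  obtain ⟨-, h2⟩ := this
  by_cases hl : l > 0
  · rw [if_pos hl]
    rw [PySem.Int.floordiv_eq_ediv_of_pos (by omega)]
    have hlk : (l.toNat : Int) = l := Int.toNat_of_nonneg (by omega)
    rw [hlk] at h2
    have heq : l * (2 * 9 - l + 1) = l * (19 - l) := by ring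
    rw [heq] at h2
    have : l * (19 - l) / 2 =
        ((List.range l.toNat).foldl (fun (s : Int × Int) (_ : Nat) => (s.1 - 1, s.2 + s.1)) (9, 0)).2 := by
      omega
    rw [this]
    split_ifs with h
    · simp [h]
    · simp [h]
  · rw [if_neg hl]
    have hk : l.toNat = 0 := by omega
    rw [hk]
    simp only [List.range_zero, List.foldl_nil]
    split_ifs with h
    · simp [h]
    · simp [h]
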